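-- pv_equiv track=rewrite | github.com/2833844911/cyCronet | cycronet-build/python/cycronet/_utils.py | sort_headers_dict
-- ===== SOURCE A (Python) =====
-- from typing import Dict, List, Tuple
--
-- BROWSER_HEADER_ORDER = [
--     "host", "connection", "cache-control", "sec-ch-ua", "sec-ch-ua-mobile",
--     "sec-ch-ua-platform", "upgrade-insecure-requests", "user-agent", "accept",
--     "sec-fetch-site", "sec-fetch-mode", "sec-fetch-user", "sec-fetch-dest",
--     "referer", "accept-encoding", "accept-language", "cookie", "priority",
-- ]
--
-- def sort_headers_dict(headers_dict: Dict[str, str]) -> List[Tuple[str, str]]: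
--     """Sort dictionary headers in browser order."""
--     header_dict_lower = {k.lower(): (k, v) for k, v in headers_dict.items()}
--     sorted_headers = []
--
--     for key in BROWSER_HEADER_ORDER:
--         if key in header_dict_lower:
--             sorted_headers.append(header_dict_lower[key])
--             del header_dict_lower[key]
--
--     for original_key, value in header_dict_lower.values():
--         sorted_headers.append((original_key, value))
--
--     return sorted_headers
-- ===== SOURCE B (Python) =====
-- from typing import Dict, List, Tuple
--
-- BROWSER_HEADER_ORDER = [
--     "host", "connection", "cache-control", "sec-ch-ua", "sec-ch-ua-mobile",
--     "sec-ch-ua-platform", "upgrade-insecure-requests", "user-agent", "accept",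
--     "sec-fetch-site", "sec-fetch-mode", "sec-fetch-user", "sec-fetch-dest",
--     "referer", "accept-encoding", "accept-language", "cookie", "priority",
-- ]
--
-- ORDER_INDEX = {name: i for i, name in enumerate(BROWSER_HEADER_ORDER)}
--
-- def sort_headers_dict(headers_dict: Dict[str, str]) -> List[Tuple[str, str]]:
--     """Bucket (counting-sort) headers by browser priority in one pass."""
--     header_dict_lower = {k.lower(): (k, v) for k, v in headers_dict.items()}
--     n = len(BROWSER_HEADER_ORDER)
--     buckets = [[] for _ in range(n + 1)]
--     for lk, kv in header_dict_lower.items():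
--         buckets[ORDER_INDEX.get(lk, n)].append(kv)
--     return [kv for bucket in buckets for kv in bucket]
-- ===== Notes on version B (the rewrite author's own statement) =====
-- stated objective: alternative
-- what changed: A selects headers by scanning BROWSER_HEADER_ORDER with a membership test and delete per name and then appends the leftovers; B precomputes a name-to-priority index once and distributes the lowercased-key dict's items into priority buckets in a single pass (counting sort), then flattens the buckets.
import Mathlib
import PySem

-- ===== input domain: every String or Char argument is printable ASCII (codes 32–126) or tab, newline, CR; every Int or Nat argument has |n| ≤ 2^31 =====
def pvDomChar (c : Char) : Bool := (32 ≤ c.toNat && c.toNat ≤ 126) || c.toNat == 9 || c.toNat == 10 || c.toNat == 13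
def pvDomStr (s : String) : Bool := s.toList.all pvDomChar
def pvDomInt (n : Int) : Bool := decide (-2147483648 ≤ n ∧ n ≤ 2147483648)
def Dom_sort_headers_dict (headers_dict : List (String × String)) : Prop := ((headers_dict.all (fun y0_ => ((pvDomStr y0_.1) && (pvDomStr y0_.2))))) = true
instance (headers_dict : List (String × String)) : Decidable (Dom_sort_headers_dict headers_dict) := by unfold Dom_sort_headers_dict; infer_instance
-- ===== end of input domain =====

-- B replaces A's guided two-pass selection (scan BROWSER_HEADER_ORDER, membership-test + delete per name)
-- with a one-pass bucket (counting) sort of the lowercased-key dict by a precomputed priority index; same return value.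

-- ===== PORT A =====
def BROWSER_HEADER_ORDER : List String :=
  ["host", "connection", "cache-control", "sec-ch-ua", "sec-ch-ua-mobile",
   "sec-ch-ua-platform", "upgrade-insecure-requests", "user-agent", "accept",
   "sec-fetch-site", "sec-fetch-mode", "sec-fetch-user", "sec-fetch-dest",
   "referer", "accept-encoding", "accept-language", "cookie", "priority"]

def sort_headers_dict (headers_dict : List (String × String)) : List (String × String) :=
  -- header_dict_lower = {k.lower(): (k, v) for k, v in headers_dict.items()}
  let header_dict_lower : PySem.Dict String (String × String) :=
    headers_dict.foldl (fun d kv => d.insert (PySem.Str.lower kv.1) (kv.1, kv.2)) PySem.Dict.empty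
  -- for key in BROWSER_HEADER_ORDER: if key in dict: append dict[key]; del dict[key]
  let st :=
    BROWSER_HEADER_ORDER.foldl
      (fun (st : List (String × String) × PySem.Dict String (String × String)) key =>
        match st.2.get? key with
        | some p => (st.1 ++ [p], st.2.erase key)
        | none => st)
      ([], header_dict_lower)
  -- for original_key, value in header_dict_lower.values(): append
  st.1 ++ st.2.values

-- ===== PORT B =====
-- ORDER_INDEX = {name: i for i, name in enumerate(BROWSER_HEADER_ORDER)}
def ORDER_INDEX : PySem.Dict String Int :=
  (PySem.List.enumerate BROWSER_HEADER_ORDER 0).foldl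
    (fun od p => od.insert p.2 p.1) PySem.Dict.empty

def sort_headers_dict_alt (headers_dict : List (String × String)) : List (String × String) :=
  let header_dict_lower : PySem.Dict String (String × String) :=
    headers_dict.foldl (fun d kv => d.insert (PySem.Str.lower kv.1) (kv.1, kv.2)) PySem.Dict.empty
  let n : Int := (BROWSER_HEADER_ORDER.length : Int)
  -- buckets = [[] for _ in range(n + 1)]
  let buckets : List (List (String × String)) := List.replicate (BROWSER_HEADER_ORDER.length + 1) []
  -- for lk, kv in header_dict_lower.items(): buckets[ORDER_INDEX.get(lk, n)].append(kv)
  -- (the bucket index is always in 0..n, hence nonnegative: .toNat is exact here)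
  let buckets :=
    header_dict_lower.items.foldl
      (fun bs it => bs.modify (ORDER_INDEX.getD it.1 n).toNat (fun b => b ++ [it.2])) buckets
  -- [kv for bucket in buckets for kv in bucket]
  buckets.flatten

-- ===== PRECONDITION & SPEC =====
def Spec_sort_headers_dict (headers_dict : List (String × String)) (out : List (String × String)) : Prop := out = sort_headers_dict_alt headers_dict
instance (headers_dict : List (String × String)) (out : List (String × String)) : Decidable (Spec_sort_headers_dict headers_dict out) := by unfold Spec_sort_headers_dict; infer_instance

-- ===== CLAIM (what is proved, stated in full; the proofs are below) =====
def Claim_equal_sort_headers_dict : Prop := ∀ (headers_dict : List (String × String)), Dom_sort_headers_dict headers_dict → Spec_sort_headers_dict headers_dict (sort_headers_dict headers_dict)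

-- ===== LEMMAS AND PROOFS =====

-- priority of a lowercased header name: its index in BROWSER_HEADER_ORDER, or 18 if unknown
def pvPri (lk : String) : Nat := (ORDER_INDEX.getD lk (BROWSER_HEADER_ORDER.length : Int)).toNat

lemma pv_filterMap_eq_flatMap_toList {α β : Type} (f : α → Option β) :
    ∀ (l : List α), l.filterMap f = l.flatMap (fun a => (f a).toList) := by
  intro l
  induction l with
  | nil => rfl
  | cons a l ih => cases h : f a <;> simp [h, ih]

-- find? skips over elements removed by a filter on another key
lemma pv_find?_filter_ne {X : Type} (k k' : String) (hne : k' ≠ k) :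
    ∀ (xs : List (String × X)),
      (xs.filter (fun p => !(p.1 == k))).find? (fun p => p.1 == k') = xs.find? (fun p => p.1 == k') := by
  intro xs
  induction xs with
  | nil => rfl
  | cons a xs ih =>
    have hk'k : (k' == k) = false := by simpa using hne
    have hkk' : (k == k') = false := by simpa using fun h => hne h.symm
    by_cases h1 : a.1 = k
    · simp [h1, hkk', ih]
    · by_cases h2 : a.1 = k'
      · simp [h2, hk'k]
      · simp [h1, h2, ih]

lemma pv_get?_erase_of_ne {X : Type} (d : PySem.Dict String X) (k k' : String) (hne : k' ≠ k) :
    (d.erase k).get? k' = d.get? k' := by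
  simp only [PySem.Dict.erase, PySem.Dict.get?]
  rw [pv_find?_filter_ne k k' hne]

-- on a fst-Nodup list, the elements with a given key are exactly find? of that key
lemma pv_filter_key_eq_find?_toList {X : Type} (k : String) :
    ∀ (l : List (String × X)), (l.map Prod.fst).Nodup →
      l.filter (fun it => it.1 == k) = (l.find? (fun it => it.1 == k)).toList := by
  intro l
  induction l with
  | nil => simp
  | cons a l ih =>
    intro hnd
    simp only [List.map_cons, List.nodup_cons] at hnd
    by_cases h : a.1 = k
    · have : l.filter (fun it => it.1 == k) = [] := by
        apply List.filter_eq_nil_iff.mpr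
        intro x hx
        simp only [beq_iff_eq]
        intro hxk
        exact hnd.1 (by rw [← h] at hxk; exact (List.mem_map.mpr ⟨x, hx, hxk⟩))
      simp [h, this]
    · simp [h, ih hnd.2]

-- ===== A-side characterization =====
lemma pv_aloop (l : List String) :
    l.Nodup → ∀ (acc : List (String × String)) (d : PySem.Dict String (String × String)),
      (l.foldl
        (fun (st : List (String × String) × PySem.Dict String (String × String)) key =>
          match st.2.get? key with
          | some p => (st.1 ++ [p], st.2.erase key)
          | none => st)
        (acc, d))
      = (acc ++ l.filterMap d.get?,
         PySem.Dict.mk (d.items.filter (fun it => !(l.contains it.1)))) := by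
  induction l with
  | nil =>
    intro _ acc d
    simp only [List.foldl_nil, List.filterMap_nil, List.append_nil]
    congr 1
    · cases d with
      | mk items => simp
  | cons k l ih =>
    intro hnd acc d
    simp only [List.nodup_cons] at hnd
    simp only [List.foldl_cons]
    cases h : d.get? k with
    | none =>
      have hnone : ∀ p ∈ d.items, ¬(p.1 == k) = true := by
        have := h
        simp only [PySem.Dict.get?] at this
        have hf : d.items.find? (fun p => p.1 == k) = none := by
          cases hfind : d.items.find? (fun p => p.1 == k) <;> simp [hfind] at this ⊢
        exact List.find?_eq_none.mp hf
      rw [ih hnd.2 acc d]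
      simp only [List.filterMap_cons, h]
      congr 2
      apply List.filter_congr
      intro x hx
      have hxf : (x.1 == k) = false := by
        have := hnone x hx
        simpa using this
      simp only [List.contains_cons, hxf, Bool.false_or]
    | some p =>
      rw [ih hnd.2 (acc ++ [p]) (d.erase k)]
      refine Prod.ext ?_ ?_
      · -- accumulated list
        simp only [List.filterMap_cons, h, List.append_assoc, List.singleton_append]
        congr 2
        apply List.filterMap_congr
        intro k' hk'
        exact pv_get?_erase_of_ne d k k' (fun he => hnd.1 (he ▸ hk'))
      · -- residual dict
        simp only [PySem.Dict.erase, List.filter_filter]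
        congr 1
        apply List.filter_congr
        intro x _
        simp only [List.contains_cons]
        cases hxk : (x.1 == k) <;> simp

-- ===== ORDER_INDEX characterization =====
lemma pv_orderD_get? (ord : List String) (hnd : ord.Nodup) (s : String) :
    ((PySem.List.enumerate ord 0).foldl (fun od p => od.insert p.2 p.1) PySem.Dict.empty).get? s
      = if s ∈ ord then some (List.idxOf s ord : Int) else none := by
  induction ord using List.reverseRecOn with
  | nil => simp [PySem.List.enumerate, PySem.Dict.get?, PySem.Dict.empty]
  | append_singleton l x ih =>
    have h2 := hnd
    rw [List.nodup_append] at h2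
    have hndl : l.Nodup := h2.1
    have hx : x ∉ l := fun hm => h2.2.2 x hm x (by simp) rfl
    rw [PySem.List.enumerate_append]
    simp only [List.foldl_append, PySem.List.enumerate, List.foldl_cons, List.foldl_nil]
    rw [PySem.Dict.get?_insert]
    by_cases hs : s = x
    · subst hs
      simp [List.idxOf_append, hx]
    · rw [if_neg hs, ih hndl]
      by_cases hm : s ∈ l
      · simp [hm, List.idxOf_append, List.mem_append, hs]
      · have hnm : s ∉ l ++ [x] := by simp [hs, hm]
        simp [hm, hnm]

lemma pv_pri_spec (lk : String) :
    pvPri lk = if lk ∈ BROWSER_HEADER_ORDER then List.idxOf lk BROWSER_HEADER_ORDER else 18 := by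
  have hnd : BROWSER_HEADER_ORDER.Nodup := by decide
  unfold pvPri ORDER_INDEX
  rw [PySem.Dict.getD_eq_get?_getD, pv_orderD_get? BROWSER_HEADER_ORDER hnd lk]
  by_cases hm : lk ∈ BROWSER_HEADER_ORDER
  · simp [hm]
  · rw [if_neg hm, if_neg hm]
    decide

lemma pv_pri_le (lk : String) : pvPri lk ≤ 18 := by
  rw [pv_pri_spec]
  by_cases hm : lk ∈ BROWSER_HEADER_ORDER
  · rw [if_pos hm]
    have hlt := List.idxOf_lt_length_iff.mpr hm
    have h18 : BROWSER_HEADER_ORDER.length = 18 := by decide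
    omega
  · rw [if_neg hm]

lemma pv_pri_eq_18_iff (lk : String) : (pvPri lk = 18) ↔ lk ∉ BROWSER_HEADER_ORDER := by
  rw [pv_pri_spec]
  by_cases hm : lk ∈ BROWSER_HEADER_ORDER
  · rw [if_pos hm]
    have hlt := List.idxOf_lt_length_iff.mpr hm
    have h18 : BROWSER_HEADER_ORDER.length = 18 := by decide
    constructor
    · intro h; omega
    · intro h; exact (h hm).elim
  · rw [if_neg hm]
    simp [hm]

lemma pv_pri_eq_iff (lk : String) (j : Nat) (hj : j < 18) :
    (pvPri lk = j) ↔ lk = BROWSER_HEADER_ORDER[j]'(Nat.lt_of_lt_of_le hj (by decide)) := by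
  have hnd : BROWSER_HEADER_ORDER.Nodup := by decide
  have hjl : j < BROWSER_HEADER_ORDER.length := Nat.lt_of_lt_of_le hj (by decide)
  rw [pv_pri_spec]
  by_cases hm : lk ∈ BROWSER_HEADER_ORDER
  · rw [if_pos hm]
    constructor
    · intro h
      have hlt : List.idxOf lk BROWSER_HEADER_ORDER < BROWSER_HEADER_ORDER.length :=
        List.idxOf_lt_length_iff.mpr hm
      have hg := List.getElem_idxOf hlt
      simp only [h] at hg
      exact hg.symm
    · intro h
      subst h
      exact List.Nodup.idxOf_getElem hnd j hjl
  · rw [if_neg hm]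
    constructor
    · intro h; omega
    · intro h
      exact (hm (h ▸ List.getElem_mem hjl)).elim

-- ===== B-side characterization =====
lemma pv_bloop_length (l : List (String × (String × String))) (bs : List (List (String × String))) :
    (l.foldl (fun bs it => bs.modify (pvPri it.1) (fun b => b ++ [it.2])) bs).length = bs.length := by
  induction l generalizing bs with
  | nil => rfl
  | cons a l ih => simp [List.foldl_cons, ih, List.length_modify]

lemma pv_bloop_getElem (l : List (String × (String × String))) :
    ∀ (bs : List (List (String × String))) (j : Nat) (hj : j < bs.length)
      (_ : ∀ it ∈ l, pvPri it.1 < bs.length),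
      (l.foldl (fun bs it => bs.modify (pvPri it.1) (fun b => b ++ [it.2])) bs)[j]'(by rw [pv_bloop_length]; exact hj)
        = bs[j] ++ (l.filter (fun it => pvPri it.1 == j)).map (·.2) := by
  induction l with
  | nil => intro bs j hj _; simp
  | cons a l ih =>
    intro bs j hj hall
    simp only [List.foldl_cons]
    rw [ih (bs.modify (pvPri a.1) (fun b => b ++ [a.2])) j (by rw [List.length_modify]; exact hj)
        (by intro it hit; rw [List.length_modify]; exact hall it (List.mem_cons_of_mem _ hit))]
    rw [List.getElem_modify]
    by_cases h : pvPri a.1 = j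
    · simp [h]
    · simp [h]

-- ===== main proof =====
set_option maxHeartbeats 2000000 in
lemma pv_main (headers_dict : List (String × String)) :
    sort_headers_dict headers_dict = sort_headers_dict_alt headers_dict := by
  have hndORD : BROWSER_HEADER_ORDER.Nodup := by decide
  simp only [sort_headers_dict, sort_headers_dict_alt]
  set d : PySem.Dict String (String × String) :=
    headers_dict.foldl (fun d kv => d.insert (PySem.Str.lower kv.1) (kv.1, kv.2)) PySem.Dict.empty with hd
  have hnodup : (d.items.map Prod.fst).Nodup := by
    have := PySem.Dict.nodup_keys_foldl_insert_key headers_dict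
      (fun kv => PySem.Str.lower kv.1) (fun _ kv => (kv.1, kv.2)) PySem.Dict.empty
      (by simp [PySem.Dict.keys, PySem.Dict.empty])
    simpa [PySem.Dict.keys, hd] using this
  -- A side
  rw [pv_aloop BROWSER_HEADER_ORDER hndORD [] d]
  simp only [List.nil_append, PySem.Dict.values]
  -- B side: characterize the final buckets
  have hlen : (List.replicate (BROWSER_HEADER_ORDER.length + 1) ([] : List (String × String))).length = 19 := by decide
  have hall : ∀ it ∈ d.items, pvPri it.1 < (List.replicate (BROWSER_HEADER_ORDER.length + 1) ([] : List (String × String))).length := by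
    intro it _
    rw [hlen]
    have := pv_pri_le it.1
    omega
  have hfold : (d.items.foldl
      (fun bs it => bs.modify ((ORDER_INDEX.getD it.1 (BROWSER_HEADER_ORDER.length : Int)).toNat) (fun b => b ++ [it.2]))
      (List.replicate (BROWSER_HEADER_ORDER.length + 1) []))
      = (List.range 19).map (fun j => (d.items.filter (fun it => pvPri it.1 == j)).map (·.2)) := by
    have hstep : (fun (bs : List (List (String × String))) (it : String × (String × String)) =>
        bs.modify ((ORDER_INDEX.getD it.1 (BROWSER_HEADER_ORDER.length : Int)).toNat) (fun b => b ++ [it.2]))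
        = (fun bs it => bs.modify (pvPri it.1) (fun b => b ++ [it.2])) := rfl
    rw [hstep]
    apply List.ext_getElem
    · rw [pv_bloop_length]
      simp [hlen]
    · intro j h1 h2
      rw [pv_bloop_getElem d.items _ j (by rw [pv_bloop_length] at h1; exact h1) hall]
      simp only [List.getElem_map, List.getElem_range, List.getElem_replicate, List.nil_append]
  rw [hfold]
  -- each known bucket j < 18 is the (at most singleton) lookup of BROWSER_HEADER_ORDER[j]
  have hclass : ∀ (j : Nat) (hj : j < 18),
      (d.items.filter (fun it => pvPri it.1 == j)).map (·.2)
        = (d.get? (BROWSER_HEADER_ORDER[j]'(Nat.lt_of_lt_of_le hj (by decide)))).toList := by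
    intro j hj
    have hcond : (fun (it : String × (String × String)) => pvPri it.1 == j)
        = (fun it => it.1 == BROWSER_HEADER_ORDER[j]'(Nat.lt_of_lt_of_le hj (by decide))) := by
      funext it
      have hiff := pv_pri_eq_iff it.1 j hj
      by_cases h : pvPri it.1 = j
      · have h2 := hiff.mp h
        have hb1 : (pvPri it.1 == j) = true := by simp [h]
        have hb2 : (it.1 == BROWSER_HEADER_ORDER[j]'(Nat.lt_of_lt_of_le hj (by decide))) = true := by
          simp [h2]
        rw [hb1, hb2]
      · have h2 : ¬ it.1 = BROWSER_HEADER_ORDER[j]'(Nat.lt_of_lt_of_le hj (by decide)) :=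
          fun he => h (hiff.mpr he)
        have hb1 : (pvPri it.1 == j) = false := by simp [h]
        have hb2 : (it.1 == BROWSER_HEADER_ORDER[j]'(Nat.lt_of_lt_of_le hj (by decide))) = false := by
          simp [h2]
        rw [hb1, hb2]
    rw [hcond, pv_filter_key_eq_find?_toList _ d.items hnodup]
    simp only [PySem.Dict.get?]
    cases hfind : d.items.find? (fun it => it.1 == BROWSER_HEADER_ORDER[j]'(Nat.lt_of_lt_of_le hj (by decide))) <;>
      simp
  -- the unknown bucket is the residual values
  have hunk : (d.items.filter (fun it => pvPri it.1 == 18)).map (·.2)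
      = (d.items.filter (fun it => !(BROWSER_HEADER_ORDER.contains it.1))).map (·.2) := by
    congr 1
    apply List.filter_congr
    intro x _
    have hiff := pv_pri_eq_18_iff x.1
    by_cases h : pvPri x.1 = 18
    · have hnm := hiff.mp h
      have hc : BROWSER_HEADER_ORDER.contains x.1 = false := by simpa using hnm
      have hb1 : (pvPri x.1 == 18) = true := by simp [h]
      rw [hb1, hc]
      rfl
    · have hm : x.1 ∈ BROWSER_HEADER_ORDER := by
        by_contra hc
        exact h (hiff.mpr hc)
      have hc : BROWSER_HEADER_ORDER.contains x.1 = true := by simpa using hm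
      have hb1 : (pvPri x.1 == 18) = false := by simp [h]
      rw [hb1, hc]
      rfl
  -- assemble: both sides are the same 19 concatenated segments
  rw [pv_filterMap_eq_flatMap_toList]
  have hr : List.range 19 = [0,1,2,3,4,5,6,7,8,9,10,11,12,13,14,15,16,17,18] := by decide
  rw [hr]
  simp only [List.map_cons, List.map_nil, List.flatten_cons, List.flatten_nil, List.append_nil]
  rw [hclass 0 (by omega), hclass 1 (by omega), hclass 2 (by omega), hclass 3 (by omega),
      hclass 4 (by omega), hclass 5 (by omega), hclass 6 (by omega), hclass 7 (by omega),
      hclass 8 (by omega), hclass 9 (by omega), hclass 10 (by omega), hclass 11 (by omega),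
      hclass 12 (by omega), hclass 13 (by omega), hclass 14 (by omega), hclass 15 (by omega),
      hclass 16 (by omega), hclass 17 (by omega), hunk]
  simp only [BROWSER_HEADER_ORDER, List.flatMap_cons, List.flatMap_nil, List.append_nil,
    List.getElem_cons_zero, List.getElem_cons_succ, List.append_assoc]

-- ===== VERDICT (by name: the statement is the Claim_ definition above) =====
theorem sort_headers_dict_spec : Claim_equal_sort_headers_dict :=
  fun headers_dict _ => pv_main headers_dict
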